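-- pv_equiv track=rewrite | github.com/birrut/SoT_Bot | galactic_power.py | get_proper_name
-- ===== SOURCE A (Python) =====
-- def get_proper_name(name, dic_list):
--     """takes a name from command and a one days list of dictionaries of form {id:[name, tickets]} and returns id."""
--
--     out_list = []
--     for key in dic_list:
--         #print (dic_list[key])
--         try:
--             if dic_list[key][0].casefold()==name.casefold():
--                 out_list.append((key, dic_list[key][0]))
--                 return [key, dic_list[key][0]]
--         except TypeError:
--             pass
--     if not out_list:
--         for key in dic_list:
--             try:
--                 if name.casefold() in dic_list[key][0].casefold():
--                     out_list.append((key, dic_list[key][0]))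
--             except TypeError:
--                 pass
--     if len(out_list) == 1:
--             return out_list[0]
-- ===== SOURCE B (Python) =====
-- def get_proper_name(name, dic_list):
--     """takes a name from command and a one days list of dictionaries of form {id:[name, tickets]} and returns id."""
--     target = name.casefold()
--     matches = []
--     for key in dic_list:
--         try:
--             val = dic_list[key][0]
--             folded = val.casefold()
--         except TypeError:
--             continue
--         if folded == target:
--             return [key, val]
--         if target in folded:
--             matches.append([key, val])
--     if len(matches) == 1:
--         return matches[0]
-- ===== Notes on version B (the rewrite author's own statement) =====
-- stated objective: simpler
-- what changed: Two sequential scans (exact-match scan, then a full substring-collecting scan) are collapsed into one pass that returns immediately on an exact casefold match and otherwise accumulates substring matches, with name.casefold() hoisted out of the loop instead of recomputed per element.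
-- outside the precondition, e.g. on get_proper_name('x', {'a': ['x'], 'b': []}): A returns ['a', 'x'], B returns ['a', 'x']
import Mathlib
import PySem

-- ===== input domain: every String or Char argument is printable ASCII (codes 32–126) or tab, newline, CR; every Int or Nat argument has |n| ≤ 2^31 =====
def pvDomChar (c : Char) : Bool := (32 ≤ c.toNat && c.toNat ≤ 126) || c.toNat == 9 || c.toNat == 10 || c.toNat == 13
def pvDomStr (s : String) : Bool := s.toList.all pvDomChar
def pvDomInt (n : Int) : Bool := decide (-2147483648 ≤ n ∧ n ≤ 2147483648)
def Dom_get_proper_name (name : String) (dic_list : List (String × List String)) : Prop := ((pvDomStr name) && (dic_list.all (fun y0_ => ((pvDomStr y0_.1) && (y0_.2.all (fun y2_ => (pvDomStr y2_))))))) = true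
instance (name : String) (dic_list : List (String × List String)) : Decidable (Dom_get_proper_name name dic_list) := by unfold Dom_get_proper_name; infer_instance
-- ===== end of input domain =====

-- B collapses A's two scans into one pass (return on exact casefold match, else collect
-- substring ms, len==1 gate after the loop); equivalence of return values is proved on
-- inputs where no dict value is the empty list (there A may raise IndexError).
-- casefold is ported as PySem.Str.lower: exact on the printable-ASCII domain.

-- ===== PORT A =====
-- first loop: first key whose value's name casefold-equals name.casefold()
def gpnLoop1 (target : String) : List (String × List String) → Option (List String)
  | [] => none
  | (k, v) :: rest =>
    match PySem.List.pyGet? v 0 with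
    | none => none  -- IndexError (uncaught in A): outside Pre_
    | some val =>
      if PySem.Str.lower val = target then some [k, val] else gpnLoop1 target rest

-- second loop: collect all keys whose value's name contains name.casefold()
def gpnLoop2 (target : String) : List (String × List String) → List (List String)
  | [] => []
  | (k, v) :: rest =>
    match PySem.List.pyGet? v 0 with
    | none => []  -- IndexError (uncaught in A): outside Pre_
    | some val =>
      if PySem.Str.isIn target (PySem.Str.lower val) then
        [k, val] :: gpnLoop2 target rest
      else gpnLoop2 target rest

def get_proper_name (name : String) (dic_list : List (String × List String)) : Option (List String) :=
  match gpnLoop1 (PySem.Str.lower name) dic_list with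
  | some r => some r
  | none =>
    let out_list := gpnLoop2 (PySem.Str.lower name) dic_list
    if out_list.length = 1 then out_list.head? else none

-- ===== PORT B =====
-- single pass: return on exact match, else accumulate substring ms
def gpnAltLoop (target : String) (ms : List (List String)) :
    List (String × List String) → Option (List String)
  | [] => if ms.length = 1 then ms.head? else none
  | (k, v) :: rest =>
    match PySem.List.pyGet? v 0 with
    | none => none  -- IndexError in B as well: outside Pre_
    | some val =>
      let folded := PySem.Str.lower val
      if folded = target then some [k, val]
      else if PySem.Str.isIn target folded then gpnAltLoop target (ms ++ [[k, val]]) rest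
      else gpnAltLoop target ms rest

def get_proper_name_alt (name : String) (dic_list : List (String × List String)) : Option (List String) :=
  gpnAltLoop (PySem.Str.lower name) [] dic_list

-- ===== PRECONDITION & SPEC =====
-- Pre_ excludes dicts in which some value is the empty list: on such inputs A raises
-- IndexError unless an exact match occurs earlier in the iteration (a narrowing of A's
-- returning domain only in that earlier-exact-match case; B returns the same value there).
def Pre_get_proper_name (name : String) (dic_list : List (String × List String)) : Prop :=
  ∀ p ∈ dic_list, p.2 ≠ []
instance (name : String) (dic_list : List (String × List String)) : Decidable (Pre_get_proper_name name dic_list) := by unfold Pre_get_proper_name; infer_instance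

def pvWitness_get_proper_name : String × (List (String × List String)) :=
  ("han", [("123", ["Han Solo", "3"]), ("456", ["Leia", "2"])])

def Spec_get_proper_name (name : String) (dic_list : List (String × List String)) (out : Option (List String)) : Prop := out = get_proper_name_alt name dic_list
instance (name : String) (dic_list : List (String × List String)) (out : Option (List String)) : Decidable (Spec_get_proper_name name dic_list out) := by unfold Spec_get_proper_name; infer_instance

-- ===== CLAIM (what is proved, stated in full; the proofs are below) =====
def Claim_equal_get_proper_name : Prop := ∀ (name : String) (dic_list : List (String × List String)), Dom_get_proper_name name dic_list → Pre_get_proper_name name dic_list → Spec_get_proper_name name dic_list (get_proper_name name dic_list)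

-- ===== LEMMAS AND PROOFS =====

theorem gpnAltLoop_eq (target : String) :
    ∀ (l : List (String × List String)) (acc : List (List String)),
      (∀ p ∈ l, p.2 ≠ []) →
      gpnAltLoop target acc l =
        match gpnLoop1 target l with
        | some r => some r
        | none =>
          let out := acc ++ gpnLoop2 target l
          if out.length = 1 then out.head? else none := by
  intro l
  induction l with
  | nil => intro acc _; simp [gpnAltLoop, gpnLoop1, gpnLoop2]
  | cons p rest ih =>
    intro acc h
    obtain ⟨k, v⟩ := p
    have hv : v ≠ [] := h (k, v) (List.mem_cons_self)
    have hrest : ∀ q ∈ rest, q.2 ≠ [] := fun q hq => h q (List.mem_cons_of_mem _ hq)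
    obtain ⟨x, xs, rfl⟩ := List.exists_cons_of_ne_nil hv
    simp only [gpnAltLoop, gpnLoop1, gpnLoop2, PySem.List.pyGet?_zero_cons]
    by_cases he : PySem.Str.lower x = target
    · simp [he]
    · simp only [he, if_false]
      by_cases hi : PySem.Str.isIn target (PySem.Str.lower x)
      · simp only [hi, if_true]
        rw [ih (acc ++ [[k, x]]) hrest]
        cases gpnLoop1 target rest <;> simp
      · simp only [hi]
        exact ih acc hrest

-- ===== VERDICT (by name: the statement is the Claim_ definition above) =====
theorem get_proper_name_spec : Claim_equal_get_proper_name := by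
  intro name dic_list _ hpre
  unfold Spec_get_proper_name get_proper_name get_proper_name_alt
  rw [gpnAltLoop_eq (PySem.Str.lower name) dic_list [] hpre]
  cases gpnLoop1 (PySem.Str.lower name) dic_list <;> simp
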